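-- pv_equiv track=rewrite | github.com/lord63/pyhipku | pyhipku/encode.py | write_haiku
-- ===== SOURCE A (Python) =====
-- def write_haiku(word_array, is_ipv6):
--     """Return the beautiful haiku"""
--     # String to place in schema to show word slot.
--     octct = 'OCTET'
--     schema = get_schema(is_ipv6, octct)
--
--     # Replace each instance of 'octet' in the schema with a word from
--     # the encoded word array.
--     for i in list(range(len(word_array))):
--         for j in list(range(len(schema))):
--             if schema[j] == octct:
--                 schema[j] = word_array[i]
--                 break
--     # Capitalize appropriate words.
--     schema = capitalize_haiku(schema)
--     haiku = ''.join(schema)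
--     return haiku
--
-- def get_schema(is_ipv6, octet):
--     """Get the template with word slots"""
--     new_line = '\n'
--     period = '.'
--     space = ' '
--     non_words = [new_line, period, space]
--     if is_ipv6:
--         schema = [octet, octet, 'and', octet, octet, new_line, octet, octet,
--                   octet, octet, octet, octet, octet, period, new_line, octet,
--                   octet, octet, octet, octet, period, new_line]
--     else:
--         schema = ['The', octet, octet, octet, new_line, octet, 'in the',
--                   octet, octet, period, new_line, octet, octet, period,
--                   new_line]
--     space_num = 0
--     # Add spaces before words except the first word.
--     for i in list(range(1, len(schema))):
--         i = i + space_num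
--         insert_space = True
--         # If the current entry is a non_word, don't add a space.
--         if schema[i] in non_words:
--             insert_space = False
--         # If the previous entry is a new_line, don't add a space.
--         if schema[i-1] == new_line:
--             insert_space = False
--         if insert_space:
--             schema.insert(i, space)
--             space_num = space_num + 1
--     return schema
--
-- def capitalize_haiku(haiku_array):
--     """Capitalize appropriate words in haiku"""
--     period = '.'
--     # Always capitalize the first word.
--     haiku_array[0] = haiku_array[0].capitalize()
--     for i in list(range(1, len(haiku_array))):
--         if haiku_array[i] == period and i+2 < len(haiku_array):
--             # If the current entry is a period then the next entry will
--             # be a new_line or a space, so check two positions after and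
--             # capitalize that entry, so long as it's a word.
--             haiku_array[i+2] = haiku_array[i+2].capitalize()
--     return haiku_array
-- ===== SOURCE B (Python) =====
-- # The haiku template is a fixed, fully spaced token list, so B precomputes it as a
-- # literal, fills the slots in one forward sweep, and capitalizes by position.
--
-- IPV4_TEMPLATE = ['The', ' ', 'OCTET', ' ', 'OCTET', ' ', 'OCTET', '\n', 'OCTET',
--                  ' ', 'in the', ' ', 'OCTET', ' ', 'OCTET', '.', '\n', 'OCTET',
--                  ' ', 'OCTET', '.', '\n']
--
-- IPV6_TEMPLATE = ['OCTET', ' ', 'OCTET', ' ', 'and', ' ', 'OCTET', ' ', 'OCTET',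
--                  '\n', 'OCTET', ' ', 'OCTET', ' ', 'OCTET', ' ', 'OCTET', ' ',
--                  'OCTET', ' ', 'OCTET', ' ', 'OCTET', '.', '\n', 'OCTET', ' ',
--                  'OCTET', ' ', 'OCTET', ' ', 'OCTET', ' ', 'OCTET', '.', '\n']
--
--
-- def write_haiku(word_array, is_ipv6):
--     """Return the beautiful haiku"""
--     octet = 'OCTET'
--     template = IPV6_TEMPLATE if is_ipv6 else IPV4_TEMPLATE
--     # One forward sweep: each slot takes the next word, surplus slots keep the
--     # placeholder.
--     words = iter(word_array)
--     filled = [next(words, t) if t == octet else t for t in template]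
--     # Capitalize the first token and every token two places after a period
--     # (the scan for periods starts at token 1, as the first token is the
--     # haiku's start and is capitalized anyway).
--     return ''.join(t.capitalize() if i == 0 or (i > 2 and filled[i - 2] == '.')
--                    else t
--                    for i, t in enumerate(filled))
-- ===== Notes on version B (the rewrite author's own statement) =====
-- stated objective: simpler
-- what changed: B precomputes the fully spaced schema as a literal template (A's insert-space loop disappears), fills the slots in one forward sweep with an iterator (A's per-word restart-scan of the schema disappears), and capitalizes by index in a single comprehension instead of A's in-place mutation loop.
import Mathlib
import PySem

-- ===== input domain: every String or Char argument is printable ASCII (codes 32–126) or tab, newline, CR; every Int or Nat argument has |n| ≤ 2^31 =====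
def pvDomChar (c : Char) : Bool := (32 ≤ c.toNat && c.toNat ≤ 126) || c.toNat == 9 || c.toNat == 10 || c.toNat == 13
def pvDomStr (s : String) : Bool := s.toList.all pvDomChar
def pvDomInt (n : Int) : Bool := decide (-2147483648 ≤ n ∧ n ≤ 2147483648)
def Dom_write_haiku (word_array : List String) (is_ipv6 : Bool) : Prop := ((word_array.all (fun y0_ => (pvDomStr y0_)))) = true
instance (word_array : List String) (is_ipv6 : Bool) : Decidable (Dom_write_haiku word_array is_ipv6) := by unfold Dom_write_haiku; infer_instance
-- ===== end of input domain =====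

-- B replaces A's schema-building insert loop and nested restart-scan by a literal
-- pre-spaced template filled in one forward sweep, with capitalization decided per
-- index; objective: simpler. (A mutates no caller-visible data: schema is local.)


-- ===== PORT A =====
-- shared helper: Python str.capitalize() — first char uppercased, the rest lowered (exact on ASCII)
def pyCapitalize (s : String) : String :=
  match s.toList with
  | [] => ""
  | c :: cs => String.ofList (PySem.Chars.upperChar c :: PySem.Chars.lower cs)

-- A's get_schema: build template, then the insert-space loop
def get_schema (is_ipv6 : Bool) (octet : String) : List String :=
  let new_line := "\n"
  let period := "."
  let space := " "
  let non_words := [new_line, period, space]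
  let schema0 : List String :=
    if is_ipv6 then
      [octet, octet, "and", octet, octet, new_line, octet, octet, octet, octet,
       octet, octet, octet, period, new_line, octet, octet, octet, octet, octet,
       period, new_line]
    else
      ["The", octet, octet, octet, new_line, octet, "in the", octet, octet,
       period, new_line, octet, octet, period, new_line]
  -- for i in list(range(1, len(schema))): i = i + space_num; …  (indices always in range: .getD "" is unreachable)
  let st := (PySem.List.pyRange 1 (schema0.length : Int) 1).foldl
    (fun (st : List String × Int) i0 =>
      let schema := st.1
      let space_num := st.2
      let i := i0 + space_num
      let insert_space := true
      let insert_space := if decide ((PySem.List.pyGet? schema i).getD "" ∈ non_words) then false else insert_space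
      let insert_space := if (PySem.List.pyGet? schema (i - 1)).getD "" == new_line then false else insert_space
      if insert_space then (PySem.List.insert schema i space, space_num + 1) else (schema, space_num))
    (schema0, 0)
  st.1

-- one step of A's capitalize loop body ('if haiku_array[i] == period and i+2 < len: set')
def capStep (a : List String) (i : Int) : List String :=
  if (PySem.List.pyGet? a i).getD "" == "." && decide (i + 2 < (a.length : Int)) then
    a.set (i + 2).toNat (pyCapitalize ((PySem.List.pyGet? a (i + 2)).getD ""))
  else a

-- A's capitalize_haiku; the input list is never empty at the call sites
def capitalize_haiku (haiku_array : List String) : List String :=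
  let arr := haiku_array.set 0 (pyCapitalize ((PySem.List.pyGet? haiku_array 0).getD ""))
  (PySem.List.pyRange 1 (arr.length : Int) 1).foldl capStep arr

-- A's inner j-loop with break: replace the first element equal to octct
def replace_first (schema : List String) (octct w : String) : List String :=
  match schema with
  | [] => []
  | x :: xs => if x == octct then w :: xs else x :: replace_first xs octct w

def write_haiku (word_array : List String) (is_ipv6 : Bool) : String :=
  let octct := "OCTET"
  let schema := get_schema is_ipv6 octct
  -- for i in range(len(word_array)): inner scan-and-break over the schema
  let schema := word_array.foldl (fun s w => replace_first s octct w) schema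
  PySem.Str.join "" (capitalize_haiku schema)

-- ===== PORT B =====
-- literal, fully spaced templates (the module-level constants of Source B)
def ipv4_template : List String :=
  ["The", " ", "OCTET", " ", "OCTET", " ", "OCTET", "\n", "OCTET",
   " ", "in the", " ", "OCTET", " ", "OCTET", ".", "\n", "OCTET",
   " ", "OCTET", ".", "\n"]

def ipv6_template : List String :=
  ["OCTET", " ", "OCTET", " ", "and", " ", "OCTET", " ", "OCTET",
   "\n", "OCTET", " ", "OCTET", " ", "OCTET", " ", "OCTET", " ",
   "OCTET", " ", "OCTET", " ", "OCTET", ".", "\n", "OCTET", " ",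
   "OCTET", " ", "OCTET", " ", "OCTET", " ", "OCTET", ".", "\n"]

-- one sweep over the template: each slot takes the next word (default: keep the token)
def fill_pass (schema : List String) (octct : String) (words : List String) : List String × List String :=
  match schema with
  | [] => ([], words)
  | t :: ts =>
    if t == octct then
      match words with
      | [] =>
        let r := fill_pass ts octct []
        (t :: r.1, r.2)
      | w :: ws =>
        let r := fill_pass ts octct ws
        (w :: r.1, r.2)
    else
      let r := fill_pass ts octct words
      (t :: r.1, r.2)

-- B's final genexpr: capitalize token 0 and every token two places after a period
def capitalize_by_index (l : List String) : List String :=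
  l.mapIdx (fun i t => if i = 0 ∨ (2 < i ∧ l.getD (i - 2) "" = ".") then pyCapitalize t else t)

def write_haiku_alt (word_array : List String) (is_ipv6 : Bool) : String :=
  let template := if is_ipv6 then ipv6_template else ipv4_template
  let filled := (fill_pass template "OCTET" word_array).1
  PySem.Str.join "" (capitalize_by_index filled)

-- ===== PRECONDITION & SPEC =====
-- Pre_ excludes word arrays containing the literal sentinel string 'OCTET': there A's in-band
-- placeholder collides with the data, so such a word is silently skipped (a later word overwrites
-- its slot) — an unspecified corner where A's and B's slot assignments are both defensible.
def Pre_write_haiku (word_array : List String) (is_ipv6 : Bool) : Prop := "OCTET" ∉ word_array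
instance (word_array : List String) (is_ipv6 : Bool) : Decidable (Pre_write_haiku word_array is_ipv6) := by unfold Pre_write_haiku; infer_instance
def pvWitness_write_haiku : List String × Bool := (["fast", "wind"], false)
def Spec_write_haiku (word_array : List String) (is_ipv6 : Bool) (out : String) : Prop := out = write_haiku_alt word_array is_ipv6
instance (word_array : List String) (is_ipv6 : Bool) (out : String) : Decidable (Spec_write_haiku word_array is_ipv6 out) := by unfold Spec_write_haiku; infer_instance

-- ===== CLAIM (what is proved, stated in full; the proofs are below) =====
def Claim_equal_write_haiku : Prop := ∀ (word_array : List String) (is_ipv6 : Bool), Dom_write_haiku word_array is_ipv6 → Pre_write_haiku word_array is_ipv6 → Spec_write_haiku word_array is_ipv6 (write_haiku word_array is_ipv6)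

-- ===== LEMMAS AND PROOFS =====
-- A's spacing loop on either literal template evaluates to B's literal template
set_option maxRecDepth 4000 in
lemma get_schema_false : get_schema false "OCTET" = ipv4_template := by decide
set_option maxRecDepth 8000 in
lemma get_schema_true : get_schema true "OCTET" = ipv6_template := by decide

-- Python capitalize() maps '.' and only '.' to '.'
lemma upperChar_eq_dot (c : Char) : PySem.Chars.upperChar c = '.' ↔ c = '.' := by
  unfold PySem.Chars.upperChar PySem.Chars.islower
  split_ifs with h
  · simp only [Bool.and_eq_true, decide_eq_true_eq, Char.le_def, UInt32.le_iff_toNat_le] at h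
    have hc : c.val.toNat = c.toNat := rfl
    have ha : ('a').val.toNat = 97 := by decide
    have hz : ('z').val.toNat = 122 := by decide
    rw [hc, ha, hz] at h
    constructor
    · intro hh
      have h2 := congrArg Char.toNat hh
      rw [Char.toNat_ofNat] at h2
      rw [if_pos (Or.inl (by omega))] at h2
      have hd : ('.').toNat = 46 := by decide
      omega
    · intro hh; subst hh; simp at h
  · exact Iff.rfl

lemma cap_eq_dot (s : String) : pyCapitalize s = "." ↔ s = "." := by
  unfold pyCapitalize
  rcases h : s.toList with _ | ⟨c, cs⟩
  · constructor
    · intro hh; exact absurd hh (by decide)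
    · rintro rfl; simp at h
  · have hs : s = String.ofList (c :: cs) := by
      have := congrArg String.ofList h; simpa using this
    subst hs
    constructor
    · intro hh
      have h2 : PySem.Chars.upperChar c :: PySem.Chars.lower cs = ['.'] := by
        have := congrArg String.toList hh; simpa using this
      obtain ⟨h3, h4⟩ := List.cons_eq_cons.mp h2
      have hcs : cs = [] := by
        have := congrArg List.length h4
        simpa [PySem.Chars.lower] using List.map_eq_nil_iff.mp h4
      subst hcs
      rw [(upperChar_eq_dot c).mp h3]
    · intro hh
      have h2 : c :: cs = ['.'] := by
        have := congrArg String.toList hh; simpa using this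
      obtain ⟨h3, h4⟩ := List.cons_eq_cons.mp h2
      subst h3; subst h4
      decide

-- fill with no words left = identity
lemma fill_pass_nil (schema : List String) (octct : String) :
    (fill_pass schema octct []).1 = schema := by
  induction schema with
  | nil => rfl
  | cons t ts ih => by_cases h : t == octct <;> simp [fill_pass, h, ih]

-- one word of the sweep = one restart scan of A (for a word that is not the sentinel)
lemma fill_pass_cons (schema : List String) (octct w : String) (ws : List String)
    (hw : w ≠ octct) :
    (fill_pass schema octct (w :: ws)).1 = (fill_pass (replace_first schema octct w) octct ws).1 := by
  induction schema with
  | nil => rfl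
  | cons t ts ih =>
    by_cases h : t == octct
    · simp [fill_pass, replace_first, h, hw]
    · simp [fill_pass, replace_first, h, ih]

lemma foldl_replace_eq_fill (ws : List String) (octct : String) (schema : List String)
    (hws : octct ∉ ws) :
    ws.foldl (fun s w => replace_first s octct w) schema = (fill_pass schema octct ws).1 := by
  induction ws generalizing schema with
  | nil => simp [fill_pass_nil]
  | cons w ws ih =>
    simp only [List.mem_cons, not_or] at hws
    rw [List.foldl_cons, ih _ hws.2, fill_pass_cons schema octct w ws (fun h => hws.1 h.symm)]

-- partial run of A's capitalize loop: indices 1..j processed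
def capIter (l : List String) (j : Nat) : List String :=
  (PySem.List.pyRange 1 (1 + (j : Int)) 1).foldl capStep
    (l.set 0 (pyCapitalize ((PySem.List.pyGet? l 0).getD "")))

-- the loop invariant: after indices 1..j, entry k is capitalized iff k = 0 or a period sat at k-2 (and k-2 ≤ j)
lemma cap_loop (l : List String) (j : Nat) :
    (capIter l j).length = l.length ∧
    ∀ k : Nat, k < l.length →
      (capIter l j).getD k "" =
        if k = 0 ∨ (2 < k ∧ k ≤ j + 2 ∧ l.getD (k - 2) "" = ".") then
          pyCapitalize (l.getD k "") else l.getD k "" := by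
  induction j with
  | zero =>
    have hnil : PySem.List.pyRange 1 (1 + ((0 : Nat) : Int)) 1 = [] :=
      PySem.List.pyRange_one_eq_nil (by simp)
    unfold capIter
    rw [hnil]
    simp only [List.foldl_nil]
    refine ⟨by simp, ?_⟩
    intro k hk
    have h0 : ((0 : Nat) : Int) = (0 : Int) := rfl
    rw [show ((PySem.List.pyGet? l 0).getD "") = l.getD 0 "" from by
      rw [show (0 : Int) = ((0 : Nat) : Int) from rfl, ← PySem.List.pyGetD_natCast]; rfl]
    rcases Nat.eq_zero_or_pos k with hk0 | hkpos
    · subst hk0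
      simp [hk]
    · have hcond : ¬ (k = 0 ∨ (2 < k ∧ k ≤ 0 + 2 ∧ l.getD (k - 2) "" = ".")) := by
        rintro (h | ⟨h1, h2, _⟩) <;> omega
      rw [if_neg hcond]
      simp only [List.getD_eq_getElem?_getD, List.getElem?_set]
      rw [if_neg (by omega)]
  | succ j ih =>
    have hstep : capIter l (j + 1) = capStep (capIter l j) (1 + (j : Int)) := by
      unfold capIter
      rw [show (1 + ((j + 1 : Nat) : Int)) = (1 + (j : Int)) + 1 by push_cast; ring,
        PySem.List.pyRange_one_succ_right (by omega), List.foldl_append]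
      rfl
    obtain ⟨ihlen, ihval⟩ := ih
    have hread : ∀ m : Nat, (PySem.List.pyGet? (capIter l j) ((m : Nat) : Int)).getD "" = (capIter l j).getD m "" := by
      intro m; rw [← PySem.List.pyGetD_natCast]; rfl
    by_cases hk2 : j + 3 < l.length
    · -- the set position j+3 is in range
      have hk1 : 1 + j < l.length := by omega
      have hv := ihval (1 + j) hk1
      have hvd : ((capIter l j).getD (1 + j) "" = ".") ↔ (l.getD (1 + j) "" = ".") := by
        rw [hv]; split_ifs with hc
        · exact cap_eq_dot _
        · exact Iff.rfl
      by_cases hdot : l.getD (1 + j) "" = "."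
      · -- a period at 1+j: position j+3 gets capitalized
        have hset : capIter l (j + 1) =
            (capIter l j).set (j + 3) (pyCapitalize (l.getD (j + 3) "")) := by
          rw [hstep]
          unfold capStep
          rw [if_pos]
          · congr 1
            · omega
            · congr 1
              rw [show ((1 : Int) + (j : Int) + 2) = (((j + 3 : Nat)) : Int) by push_cast; ring,
                hread (j + 3), ihval (j + 3) hk2, if_neg (by rintro (h | ⟨h1, h2, _⟩) <;> omega)]
          · rw [show ((1 : Int) + (j : Int)) = (((1 + j : Nat)) : Int) by push_cast; ring,
              hread (1 + j)]
            simp only [Bool.and_eq_true, beq_iff_eq, decide_eq_true_eq]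
            exact ⟨hvd.mpr hdot, by rw [ihlen]; push_cast; omega⟩
        refine ⟨by rw [hset]; simp [ihlen], ?_⟩
        intro k hk
        rw [hset]
        simp only [List.getD_eq_getElem?_getD, List.getElem?_set]
        by_cases hkj : j + 3 = k
        · rw [if_pos hkj, if_pos (by rw [ihlen]; omega : j + 3 < (capIter l j).length)]
          rw [if_pos (Or.inr ⟨by omega, by omega, by rw [show k - 2 = 1 + j by omega]; exact hdot⟩)]
          simp [← hkj]
        · rw [if_neg hkj]
          have := ihval k hk
          simp only [List.getD_eq_getElem?_getD] at this
          rw [this]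
          apply if_congr _ rfl rfl
          constructor
          · rintro (h | ⟨h1, h2, h3⟩); · exact Or.inl h
            exact Or.inr ⟨h1, by omega, h3⟩
          · rintro (h | ⟨h1, h2, h3⟩); · exact Or.inl h
            exact Or.inr ⟨h1, by omega, h3⟩
      · -- no period at 1+j: nothing happens
        have hid : capIter l (j + 1) = capIter l j := by
          rw [hstep]
          unfold capStep
          rw [if_neg]
          rw [show ((1 : Int) + (j : Int)) = (((1 + j : Nat)) : Int) by push_cast; ring,
            hread (1 + j)]
          simp only [Bool.and_eq_true, beq_iff_eq, decide_eq_true_eq, not_and]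
          intro hc
          exact absurd (hvd.mp hc) hdot
        refine ⟨by rw [hid]; exact ihlen, ?_⟩
        intro k hk
        rw [hid, ihval k hk]
        apply if_congr _ rfl rfl
        constructor
        · rintro (h | ⟨h1, h2, h3⟩); · exact Or.inl h
          exact Or.inr ⟨h1, by omega, h3⟩
        · rintro (h | ⟨h1, h2, h3⟩); · exact Or.inl h
          by_cases hkj : k = j + 3
          · exfalso
            apply hdot
            rw [show 1 + j = k - 2 by omega]
            exact h3
          · exact Or.inr ⟨h1, by omega, h3⟩
    · -- set position out of range: loop step is a no-op
      have hid : capIter l (j + 1) = capIter l j := by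
        rw [hstep]
        unfold capStep
        rw [if_neg]
        simp only [Bool.and_eq_true, decide_eq_true_eq, not_and]
        intro _
        rw [ihlen]
        omega
      refine ⟨by rw [hid]; exact ihlen, ?_⟩
      intro k hk
      rw [hid, ihval k hk]
      apply if_congr _ rfl rfl
      constructor
      · rintro (h | ⟨h1, h2, h3⟩); · exact Or.inl h
        exact Or.inr ⟨h1, by omega, h3⟩
      · rintro (h | ⟨h1, h2, h3⟩); · exact Or.inl h
        exact Or.inr ⟨h1, by omega, h3⟩

lemma capitalize_eq (l : List String) : capitalize_haiku l = capitalize_by_index l := by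
  cases l with
  | nil => rfl
  | cons x xs =>
    obtain ⟨hlen, hval⟩ := cap_loop (x :: xs) xs.length
    have hch : capitalize_haiku (x :: xs) = capIter (x :: xs) xs.length := by
      unfold capitalize_haiku capIter
      simp only [List.length_set, List.length_cons]
      norm_num [Int.add_comm]
    rw [hch]
    apply List.ext_getElem
    · rw [hlen]
      simp [capitalize_by_index]
    · intro k hk1 hk2
      have hkl : k < (x :: xs).length := by rw [← hlen]; exact hk1
      have hkl' : k < xs.length + 1 := by simpa using hkl
      have h := hval k hkl
      rw [List.getD_eq_getElem _ _ hk1] at h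
      rw [h]
      unfold capitalize_by_index
      rw [List.getElem_mapIdx]
      rw [List.getD_eq_getElem _ _ hkl]
      apply if_congr _ rfl rfl
      constructor
      · rintro (h | ⟨h1, _, h3⟩); · exact Or.inl h
        exact Or.inr ⟨h1, h3⟩
      · rintro (h | ⟨h1, h3⟩); · exact Or.inl h
        exact Or.inr ⟨h1, by omega, h3⟩

-- ===== VERDICT (by name: the statement is the Claim_ definition above) =====
theorem write_haiku_spec : Claim_equal_write_haiku := by
  intro word_array is_ipv6 _ hpre
  unfold Spec_write_haiku write_haiku write_haiku_alt
  simp only []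
  rw [foldl_replace_eq_fill word_array "OCTET" _ hpre, capitalize_eq]
  cases is_ipv6 <;> simp [get_schema_false, get_schema_true]
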